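-- pv_equiv track=rewrite | github.com/StickyPiston-Hosting/Easy-Map-Updater | lib/utils.py | swap_tokens
-- ===== SOURCE A (Python) =====
-- def swap_tokens(string: str, pack: bool) -> str:
--     tokens = [
--         ("\\x", "__UNICODE_INDICATOR_TWO__"),
--         ("\\u", "__UNICODE_INDICATOR_FOUR__"),
--         ("\\U", "__UNICODE_INDICATOR_EIGHT__"),
--         ("\\N", "__UNICODE_INDICATOR_NAME__"),
--         ("\\b", "\b"),
--         ("\\s", " "),
--         ("\\t", "\t"),
--         ("\\n", "\n"),
--         ("\\f", "\f"),
--         ("\\r", "\r"),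
--     ]
--
--     for token_pair in tokens:
--         if pack and token_pair[1] != " ":
--             string = string.replace(token_pair[1], token_pair[0])
--         else:
--             string = string.replace(token_pair[0], token_pair[1])
--
--     return string
-- ===== SOURCE B (Python) =====
-- def swap_tokens(string: str, pack: bool) -> str:
--     tokens = [
--         ("\\x", "__UNICODE_INDICATOR_TWO__"),
--         ("\\u", "__UNICODE_INDICATOR_FOUR__"),
--         ("\\U", "__UNICODE_INDICATOR_EIGHT__"),
--         ("\\N", "__UNICODE_INDICATOR_NAME__"),
--         ("\\b", "\b"),
--         ("\\s", " "),
--         ("\\t", "\t"),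
--         ("\\n", "\n"),
--         ("\\f", "\f"),
--         ("\\r", "\r"),
--     ]
--     # resolve each token's direction once, then do one table-driven scan
--     pairs = [
--         (long, short) if pack and long != " " else (short, long)
--         for short, long in tokens
--     ]
--     out = []
--     i = 0
--     n = len(string)
--     while i < n:
--         for src, dst in pairs:
--             if string.startswith(src, i):
--                 out.append(dst)
--                 i += len(src)
--                 break
--         else:
--             out.append(string[i])
--             i += 1
--     return "".join(out)
-- ===== Notes on version B (the rewrite author's own statement) =====
-- stated objective: alternative
-- what changed: Replaces A's ten sequential full-string replace sweeps by one direction-resolved (src,dst) table and a single left-to-right scan that at each position substitutes the first matching source token.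
import Mathlib
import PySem

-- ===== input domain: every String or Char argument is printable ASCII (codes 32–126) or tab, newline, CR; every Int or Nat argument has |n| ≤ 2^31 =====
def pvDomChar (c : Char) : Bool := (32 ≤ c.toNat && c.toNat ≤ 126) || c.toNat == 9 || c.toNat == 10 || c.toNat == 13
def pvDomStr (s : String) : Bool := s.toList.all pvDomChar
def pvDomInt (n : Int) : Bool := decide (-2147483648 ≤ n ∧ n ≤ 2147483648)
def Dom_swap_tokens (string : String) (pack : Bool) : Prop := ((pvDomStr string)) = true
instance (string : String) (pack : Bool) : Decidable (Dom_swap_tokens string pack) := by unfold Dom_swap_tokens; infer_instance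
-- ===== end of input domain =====

-- B replaces A's ten sequential replace sweeps with one direction-resolved table and a single
-- left-to-right scan (objective: alternative, same cost); return value only, no mutation involved.

-- ===== PORT A =====
def swap_tokens (string : String) (pack : Bool) : String :=
  let tokens : List (String × String) := [
    ("\\x", "__UNICODE_INDICATOR_TWO__"),
    ("\\u", "__UNICODE_INDICATOR_FOUR__"),
    ("\\U", "__UNICODE_INDICATOR_EIGHT__"),
    ("\\N", "__UNICODE_INDICATOR_NAME__"),
    ("\\b", "\x08"),
    ("\\s", " "),
    ("\\t", "\t"),
    ("\\n", "\n"),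
    ("\\f", "\x0c"),
    ("\\r", "\x0d")]
  tokens.foldl
    (fun s tp =>
      if pack && (tp.2 != " ") then PySem.Str.replace s tp.2 tp.1
      else PySem.Str.replace s tp.1 tp.2)
    string

-- ===== PORT B =====
-- the same token table, as lists of characters (Source B's `tokens`)
def pvTokensC : List (List Char × List Char) := [
  ("\\x".toList, "__UNICODE_INDICATOR_TWO__".toList),
  ("\\u".toList, "__UNICODE_INDICATOR_FOUR__".toList),
  ("\\U".toList, "__UNICODE_INDICATOR_EIGHT__".toList),
  ("\\N".toList, "__UNICODE_INDICATOR_NAME__".toList),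
  ("\\b".toList, ['\x08']),
  ("\\s".toList, [' ']),
  ("\\t".toList, ['\t']),
  ("\\n".toList, ['\n']),
  ("\\f".toList, ['\x0c']),
  ("\\r".toList, ['\x0d'])]

-- Source B's `pairs`: each token's (src, dst) direction resolved once from `pack`
def pvPairs (pack : Bool) : List (List Char × List Char) :=
  pvTokensC.map (fun tp => if pack && (tp.2 != [' ']) then (tp.2, tp.1) else tp)

-- Source B's scan loop: at each position substitute the first matching source, else copy the char
def pvScan (tbl : List (List Char × List Char)) : List Char → List Char
  | [] => []
  | c :: t =>
    match tbl.find? (fun pr => pr.1.isPrefixOf (c :: t)) with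
    | some pr => pr.2 ++ pvScan tbl (t.drop (pr.1.length - 1))
    | none => c :: pvScan tbl t
termination_by s => s.length
decreasing_by all_goals (simp; try omega)

def swap_tokens_alt (string : String) (pack : Bool) : String :=
  String.ofList (pvScan (pvPairs pack) string.toList)

-- ===== PRECONDITION & SPEC =====
def pvPlaceholders : List (List Char) :=
  ["__UNICODE_INDICATOR_TWO__".toList, "__UNICODE_INDICATOR_FOUR__".toList,
   "__UNICODE_INDICATOR_EIGHT__".toList, "__UNICODE_INDICATOR_NAME__".toList]

def pvHasPHOverlap (s : List Char) : Bool :=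
  (List.range s.length).any fun i =>
    (List.range s.length).any fun j =>
      pvPlaceholders.any fun p => pvPlaceholders.any fun q =>
        p != q && i ≤ j && j < i + p.length &&
        p.isPrefixOf (s.drop i) && q.isPrefixOf (s.drop j)

-- Pre_ excludes pack-mode strings in which occurrences of two DISTINCT placeholder sentinels overlap
-- (sharing their '_'/'__' border): there A's result depends on the accidental order of its ten
-- replace passes, while B resolves the same tie by taking the leftmost occurrence — both defensible.
def Pre_swap_tokens (string : String) (pack : Bool) : Prop :=
  pack = true → pvHasPHOverlap string.toList = false
instance (string : String) (pack : Bool) : Decidable (Pre_swap_tokens string pack) := by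
  unfold Pre_swap_tokens; infer_instance

def pvWitness_swap_tokens : String × Bool := ("a \\s__UNICODE_INDICATOR_TWO__\tb", true)

def Spec_swap_tokens (string : String) (pack : Bool) (out : String) : Prop := out = swap_tokens_alt string pack
instance (string : String) (pack : Bool) (out : String) : Decidable (Spec_swap_tokens string pack out) := by unfold Spec_swap_tokens; infer_instance

-- ===== CLAIM (what is proved, stated in full; the proofs are below) =====
def Claim_equal_swap_tokens : Prop := ∀ (string : String) (pack : Bool), Dom_swap_tokens string pack → Pre_swap_tokens string pack → Spec_swap_tokens string pack (swap_tokens string pack)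

-- ===== LEMMAS AND PROOFS =====

-- clean structural form of Python's str.replace (leftmost, non-overlapping), for nonempty patterns
def pvRepl (p r : List Char) : List Char → List Char
  | [] => []
  | c :: t =>
    if p.isPrefixOf (c :: t) then r ++ pvRepl p r (t.drop (p.length - 1))
    else c :: pvRepl p r t
termination_by s => s.length
decreasing_by all_goals (simp; try omega)

-- A's composite of replace passes, at the character level
def pvF (L : List (List Char × List Char)) (s : List Char) : List Char :=
  L.foldl (fun s pr => pvRepl pr.1 pr.2 s) s

theorem pvGo_eq (p r : List Char) (hp : p ≠ []) :
    ∀ fuel (s acc : List Char), s.length ≤ fuel →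
      PySem.Chars.replace.go p r fuel s acc = acc.reverse ++ pvRepl p r s := by
  intro fuel
  induction fuel with
  | zero => intro s acc h
            have : s = [] := by cases s <;> simp_all
            subst this
            simp [PySem.Chars.replace.go, pvRepl]
  | succ n ih =>
    intro s acc h
    cases s with
    | nil => simp [PySem.Chars.replace.go, pvRepl]
    | cons c t =>
      rw [PySem.Chars.replace.go]
      by_cases hpre : p.isPrefixOf (c :: t)
      · simp only [hpre, if_true]
        rw [ih]
        · rw [pvRepl]
          simp only [hpre, if_true]
          have : List.drop p.length (c :: t) = List.drop (p.length - 1) t := by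
            cases p with
            | nil => simp at hp
            | cons a b => simp
          rw [this]
          simp
        · have hp1 : 0 < p.length := List.length_pos_iff.mpr hp
          simp at h ⊢
          omega
      · simp only [hpre]
        rw [ih t (c :: acc) (by simp at h; omega)]
        rw [pvRepl]; simp [hpre]

theorem pvReplace_eq (p r s : List Char) (hp : p ≠ []) :
    PySem.Chars.replace s p r = pvRepl p r s := by
  have : p.isEmpty = false := by simp [hp]
  simp [PySem.Chars.replace, this, pvGo_eq p r hp s.length s [] le_rfl]

theorem pvA_fold (ls : List (String × String)) (pack : Bool) (s : String) :
    (ls.foldl (fun s tp =>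
      if pack && (tp.2 != " ") then PySem.Str.replace s tp.2 tp.1
      else PySem.Str.replace s tp.1 tp.2) s).toList
    = (ls.map (fun tp => if pack && (tp.2 != " ") then (tp.2.toList, tp.1.toList)
        else (tp.1.toList, tp.2.toList))).foldl
        (fun cs pr => PySem.Chars.replace cs pr.1 pr.2) s.toList := by
  induction ls generalizing s with
  | nil => simp
  | cons hd tl ih =>
    simp only [List.foldl, List.map]
    rw [ih]
    split <;> simp [PySem.Str.toList_replace]

theorem pvFold_replace (L : List (List Char × List Char)) (s : List Char)
    (h : ∀ pr ∈ L, pr.1 ≠ []) :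
    L.foldl (fun cs pr => PySem.Chars.replace cs pr.1 pr.2) s = pvF L s := by
  induction L generalizing s with
  | nil => rfl
  | cons hd tl ih =>
    simp only [pvF, List.foldl]
    rw [pvReplace_eq _ _ _ (h hd (by simp))]
    exact ih _ (fun pr hpr => h pr (by simp [hpr]))

theorem pvA_toList (string : String) (pack : Bool) :
    (swap_tokens string pack).toList = pvF (pvPairs pack) string.toList := by
  unfold swap_tokens
  rw [pvA_fold]
  rw [pvFold_replace _ _ (by cases pack <;> decide)]
  congr 1

theorem pvB_toList (string : String) (pack : Bool) :
    (swap_tokens_alt string pack).toList = pvScan (pvPairs pack) string.toList := by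
  simp [swap_tokens_alt]

-- table facts (all verified by `decide` on the two concrete tables)
def pvOK1 (L : List (List Char × List Char)) : Prop := ∀ pr ∈ L, pr.1 ≠ [] ∧ pr.2 ≠ []
def pvOK2 (L : List (List Char × List Char)) : Prop :=
  ∀ pr ∈ L, ∀ qr ∈ L, pr.1 = qr.1 ∨ (¬ pr.1 <+: qr.1 ∧ ¬ qr.1 <+: pr.1)
def pvOK3 (L : List (List Char × List Char)) : Bool :=
  L.all fun qr => L.all fun pr => (pr.2.take 1).all fun ch => !(qr.1.tail.contains ch)
def pvOK4 (L : List (List Char × List Char)) : Prop :=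
  ∀ pr ∈ L, ∀ qr ∈ L, ¬ qr.1 <+: pr.2 ∧ ¬ pr.2 <+: qr.1
def pvOK5 (L : List (List Char × List Char)) : Prop :=
  ∀ pr ∈ L, ∀ i, i < pr.2.length → 0 < i → ∀ qr ∈ L, ¬ qr.1 <+: pr.2.drop i ∧ ¬ pr.2.drop i <+: qr.1
def pvOK6 (L : List (List Char × List Char)) : Prop :=
  ∀ pr ∈ L, ∀ i, i < pr.1.length → 0 < i → ∀ qr ∈ L, ¬ qr.1 <+: pr.1.drop i
def pvOK7 (L : List (List Char × List Char)) : Prop := L.Pairwise (fun a b => a.1 ≠ b.1)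

-- no two overlapping occurrences of distinct source tokens anywhere in s
def pvNoCross (L : List (List Char × List Char)) (s : List Char) : Prop :=
  ∀ pr ∈ L, ∀ qr ∈ L, ∀ i j : Nat, pr.1 ≠ qr.1 → i < j → j < i + pr.1.length →
    pr.1 <+: s.drop i → ¬ qr.1 <+: s.drop j

theorem pvF_nil (L : List (List Char × List Char)) : pvF L [] = [] := by
  induction L with
  | nil => rfl
  | cons hd tl ih => simp only [pvF, List.foldl] at *; rw [show pvRepl hd.1 hd.2 [] = [] from by simp [pvRepl]]; exact ih

theorem pvRepl_cons_neg (p r : List Char) (c : Char) (t : List Char) (h : ¬ p <+: (c :: t)) :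
    pvRepl p r (c :: t) = c :: pvRepl p r t := by
  rw [pvRepl]
  simp [List.isPrefixOf_iff_prefix, h]

theorem pvRepl_prepend (p r u : List Char) (hp : p ≠ []) :
    pvRepl p r (p ++ u) = r ++ pvRepl p r u := by
  cases p with
  | nil => simp at hp
  | cons a b =>
    rw [List.cons_append, pvRepl]
    have : (a :: b).isPrefixOf (a :: (b ++ u)) = true := by
      rw [List.isPrefixOf_iff_prefix]
      exact List.cons_prefix_cons.mpr ⟨rfl, ⟨u, rfl⟩⟩
    simp only [this, if_true]
    congr 1
    congr 1
    simp

theorem pvRepl_skip (p r : List Char) :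
    ∀ (w u : List Char), (∀ i < w.length, ¬ p <+: ((w ++ u).drop i)) →
      pvRepl p r (w ++ u) = w ++ pvRepl p r u := by
  intro w
  induction w with
  | nil => intro u _; rfl
  | cons c w' ih =>
    intro u h
    have h0 : ¬ p <+: (c :: (w' ++ u)) := by simpa using h 0 (by simp)
    rw [List.cons_append, pvRepl_cons_neg _ _ _ _ h0, ih u (fun i hi => by simpa using h (i+1) (by simp; omega))]
    simp

theorem pvPrefixSplit {q w u : List Char} (h : q <+: w ++ u) : q <+: w ∨ w <+: q :=
  (List.prefix_or_prefix_of_prefix h (List.prefix_append w u)).imp id id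

theorem pvChRepl (p r : List Char) (ch : Char) (hch : r.head? = some ch) :
    ∀ (u w : List Char), ch ∉ w → w <+: pvRepl p r u → w = [] ∨ w <+: u := by
  intro u
  induction u with
  | nil => intro w _ hw; rw [pvRepl] at hw; left; simpa using hw
  | cons c t ih =>
    intro w hchw hw
    rw [pvRepl] at hw
    split at hw
    · -- replacement branch: w must be empty (else its head is ch ∈ w)
      cases w with
      | nil => exact Or.inl rfl
      | cons a w' =>
        exfalso
        have hr : r = ch :: r.tail := by cases r <;> simp_all
        rw [hr, List.cons_append] at hw
        obtain ⟨ha, -⟩ := List.cons_prefix_cons.mp hw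
        exact hchw (ha ▸ List.mem_cons_self)
    · cases w with
      | nil => exact Or.inl rfl
      | cons a w' =>
        obtain ⟨rfl, hw'⟩ := List.cons_prefix_cons.mp hw
        rcases ih w' (fun hm => hchw (List.mem_cons_of_mem _ hm)) hw' with h | h
        · subst h; exact Or.inr ⟨t, rfl⟩
        · exact Or.inr (List.cons_prefix_cons.mpr ⟨rfl, h⟩)

-- generic skip-fold: if every remaining pass leaves the prefix region `w` match-free, the
-- whole composite commutes with the prefix
theorem pvFoldSkip (w : List Char) :
    ∀ (M : List (List Char × List Char)) (u : List Char),
      (∀ qr ∈ M, ∀ i < w.length, ¬ qr.1 <+: ((w ++ u).drop i)) →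
      (∀ pr ∈ M, ∀ qr ∈ M, ∀ u' i, i < w.length → ¬ qr.1 <+: ((w ++ u').drop i) →
          ¬ qr.1 <+: ((w ++ pvRepl pr.1 pr.2 u').drop i)) →
      pvF M (w ++ u) = w ++ pvF M u := by
  intro M
  induction M with
  | nil => intro u _ _; rfl
  | cons hd tl ih =>
    intro u hinv hpres
    simp only [pvF, List.foldl] at *
    rw [pvRepl_skip hd.1 hd.2 w u (fun i hi => hinv hd (by simp) i hi)]
    exact ih (pvRepl hd.1 hd.2 u)
      (fun qr hqr i hi => hpres hd (by simp) qr (by simp [hqr]) u i hi (hinv qr (by simp [hqr]) i hi))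
      (fun pr hpr qr hqr => hpres pr (by simp [hpr]) qr (by simp [hqr]))

theorem pvHeadTake {r : List Char} {ch : Char} (h : r.head? = some ch) : ch ∈ r.take 1 := by
  cases r with
  | nil => simp at h
  | cons a t => simp at h ⊢; exact h.symm

theorem pvOK3_head (L : List (List Char × List Char)) (h3 : pvOK3 L = true)
    {qr pr : List Char × List Char} {ch : Char} (hq : qr ∈ L) (hp : pr ∈ L)
    (hch : pr.2.head? = some ch) {m : Nat} (hm : 0 < m) : ch ∉ qr.1.drop m := by
  simp only [pvOK3, List.all_eq_true] at h3
  have htake : ch ∈ pr.2.take 1 := pvHeadTake hch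
  have htail : ch ∉ qr.1.tail := by
    have := h3 qr hq pr hp ch htake
    simpa using this
  intro hmem
  apply htail
  have h1 : ch ∈ (qr.1.drop 1).drop (m - 1) := by
    rw [List.drop_drop]
    rw [show 1 + (m - 1) = m from by omega]
    exact hmem
  rw [← List.drop_one]
  exact List.mem_of_mem_drop h1

theorem pvHeadEx {r : List Char} (h : r ≠ []) : ∃ ch, r.head? = some ch := by
  cases r with
  | nil => simp at h
  | cons a t => exact ⟨a, rfl⟩

theorem pvConsStep (L : List (List Char × List Char)) (h1 : pvOK1 L) (h3 : pvOK3 L = true)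
    (c : Char) (t : List Char) (h0 : ∀ pr ∈ L, ¬ pr.1 <+: (c :: t)) :
    pvF L (c :: t) = c :: pvF L t := by
  have H := pvFoldSkip [c] L t
    (by intro qr hq i hi
        obtain rfl : i = 0 := by simpa using hi
        simpa using h0 qr hq)
    (by intro pr hp qr hq u' i hi hfree hcon
        obtain rfl : i = 0 := by simpa using hi
        simp only [List.drop_zero, List.singleton_append] at hfree hcon
        apply hfree
        cases hq1 : qr.1 with
        | nil => exact absurd hq1 (h1 qr hq).1
        | cons a q' =>
          rw [hq1] at hcon
          obtain ⟨rfl, hq'⟩ := List.cons_prefix_cons.mp hcon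
          obtain ⟨ch, hch⟩ := pvHeadEx (h1 pr hp).2
          have hnin : ch ∉ q' := by
            have := pvOK3_head L h3 hq hp hch (m := 1) one_pos
            rw [hq1] at this
            simpa using this
          rcases pvChRepl pr.1 pr.2 ch hch u' q' hnin hq' with rfl | hpq
          · exact List.cons_prefix_cons.mpr ⟨rfl, List.nil_prefix⟩
          · exact List.cons_prefix_cons.mpr ⟨rfl, hpq⟩)
  simpa using H

-- a source token cannot begin strictly inside the matched source region
theorem pvSrcFree (L : List (List Char × List Char)) (h2 : pvOK2 L) (h6 : pvOK6 L)
    {pr0 qr : List Char × List Char} (hp0 : pr0 ∈ L) (hqL : qr ∈ L) (hne : qr.1 ≠ pr0.1)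
    {i : Nat} (hi : i < pr0.1.length) (hA : qr.1 <+: pr0.1.drop i) : False := by
  rcases Nat.eq_zero_or_pos i with rfl | hipos
  · simp only [List.drop_zero] at hA
    rcases h2 qr hqL pr0 hp0 with heq | ⟨hnp, _⟩
    · exact hne heq
    · exact hnp hA
  · exact h6 pr0 hp0 i hi hipos qr hqL hA

theorem pvPreStep (L : List (List Char × List Char)) (h1 : pvOK1 L) (h2 : pvOK2 L)
    (h3 : pvOK3 L = true) (h6 : pvOK6 L) (pr0 : List Char × List Char) (hp0 : pr0 ∈ L)
    (M : List (List Char × List Char)) (hM : ∀ x ∈ M, x ∈ L ∧ x.1 ≠ pr0.1)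
    (u : List Char) (hinv : ∀ qr ∈ M, ∀ i < pr0.1.length, ¬ qr.1 <+: ((pr0.1 ++ u).drop i)) :
    pvF M (pr0.1 ++ u) = pr0.1 ++ pvF M u := by
  apply pvFoldSkip pr0.1 M u hinv
  intro pk hpk qk hqk u' i hi hfree hcon
  rw [List.drop_append_of_le_length (le_of_lt hi)] at hcon
  rcases pvPrefixSplit hcon with hA | hB
  · exact pvSrcFree L h2 h6 hp0 (hM qk hqk).1 (hM qk hqk).2 hi hA
  · have hqdec : pr0.1.drop i ++ qk.1.drop (pr0.1.length - i) = qk.1 := by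
      have := List.prefix_iff_eq_append.mp hB
      rwa [List.length_drop] at this
    have hw : qk.1.drop (pr0.1.length - i) <+: pvRepl pk.1 pk.2 u' := by
      rw [← hqdec] at hcon
      exact (List.prefix_append_right_inj _).mp hcon
    by_cases hwnil : qk.1.drop (pr0.1.length - i) = []
    · have hA' : qk.1 <+: pr0.1.drop i := by
        rw [← hqdec, hwnil, List.append_nil]
      exact pvSrcFree L h2 h6 hp0 (hM qk hqk).1 (hM qk hqk).2 hi hA'
    · obtain ⟨ch, hch⟩ := pvHeadEx (h1 pk (hM pk hpk).1).2
      have hnin : ch ∉ qk.1.drop (pr0.1.length - i) :=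
        pvOK3_head L h3 (hM qk hqk).1 (hM pk hpk).1 hch (by omega)
      rcases pvChRepl pk.1 pk.2 ch hch u' _ hnin hw with h | hpq
      · exact hwnil h
      · apply hfree
        rw [List.drop_append_of_le_length (le_of_lt hi), ← hqdec]
        exact (List.prefix_append_right_inj _).mpr hpq

-- no source token can begin inside a freshly written destination region, whatever follows it
theorem pvDstFree (L : List (List Char × List Char)) (h4 : pvOK4 L) (h5 : pvOK5 L)
    (pr0 : List Char × List Char) (hp0 : pr0 ∈ L) :
    ∀ qr ∈ L, ∀ (v : List Char), ∀ i < pr0.2.length, ¬ qr.1 <+: ((pr0.2 ++ v).drop i) := by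
  intro qr hq v i hi hcon
  rw [List.drop_append_of_le_length (le_of_lt hi)] at hcon
  rcases pvPrefixSplit hcon with hA | hB
  · rcases Nat.eq_zero_or_pos i with rfl | hipos
    · exact (h4 pr0 hp0 qr hq).1 (by simpa using hA)
    · exact (h5 pr0 hp0 i hi hipos qr hq).1 hA
  · rcases Nat.eq_zero_or_pos i with rfl | hipos
    · exact (h4 pr0 hp0 qr hq).2 (by simpa using hB)
    · exact (h5 pr0 hp0 i hi hipos qr hq).2 hB

theorem pvPostStep (L : List (List Char × List Char)) (h4 : pvOK4 L) (h5 : pvOK5 L)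
    (pr0 : List Char × List Char) (hp0 : pr0 ∈ L)
    (M : List (List Char × List Char)) (hM : ∀ x ∈ M, x ∈ L) (u : List Char) :
    pvF M (pr0.2 ++ u) = pr0.2 ++ pvF M u := by
  apply pvFoldSkip pr0.2 M u
  · intro qr hq i hi
    exact pvDstFree L h4 h5 pr0 hp0 qr (hM qr hq) u i hi
  · intro pk hpk qk hqk u' i hi _
    exact pvDstFree L h4 h5 pr0 hp0 qk (hM qk hqk) (pvRepl pk.1 pk.2 u') i hi

theorem pvNoCross_drop (L : List (List Char × List Char)) (s : List Char) (k : Nat)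
    (h : pvNoCross L s) : pvNoCross L (s.drop k) := by
  intro pr hp qr hq i j hne hij hlt hpre
  rw [List.drop_drop] at hpre ⊢
  have := h pr hp qr hq (k + i) (k + j) hne (by omega) (by omega) hpre
  exact this

theorem pvMain (L : List (List Char × List Char)) (h1 : pvOK1 L) (h2 : pvOK2 L)
    (h3 : pvOK3 L = true) (h4 : pvOK4 L) (h5 : pvOK5 L) (h6 : pvOK6 L) (h7 : pvOK7 L) :
    ∀ n (s : List Char), s.length ≤ n → pvNoCross L s → pvF L s = pvScan L s := by
  intro n
  induction n with
  | zero =>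
    intro s hl _
    have : s = [] := by cases s <;> simp_all
    subst this
    rw [pvF_nil, pvScan]
  | succ n ih =>
    intro s hl hnc
    cases s with
    | nil => rw [pvF_nil, pvScan]
    | cons c t =>
      rw [pvScan]
      cases hfind : List.find? (fun pr => pr.1.isPrefixOf (c :: t)) L with
      | none =>
        have h0 : ∀ pr ∈ L, ¬ pr.1 <+: (c :: t) := by
          intro pr hpr
          have := List.find?_eq_none.mp hfind pr hpr
          simpa [List.isPrefixOf_iff_prefix] using this
        rw [pvConsStep L h1 h3 c t h0]
        have ht : pvF L t = pvScan L t :=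
          ih t (by simpa using hl) (pvNoCross_drop L (c :: t) 1 hnc)
        rw [ht]
      | some pr0 =>
        have hp0 : pr0 ∈ L := List.mem_of_find?_eq_some hfind
        have hpre0 : pr0.1 <+: (c :: t) := by
          have := List.find?_some hfind
          simpa [List.isPrefixOf_iff_prefix] using this
        have hp0ne : pr0.1 ≠ [] := (h1 pr0 hp0).1
        have hdec : pr0.1 ++ (c :: t).drop pr0.1.length = c :: t :=
          List.prefix_iff_eq_append.mp hpre0
        have hdrop : t.drop (pr0.1.length - 1) = (c :: t).drop pr0.1.length := by
          have hlp : 0 < pr0.1.length := List.length_pos_iff.mpr hp0ne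
          rw [show pr0.1.length = (pr0.1.length - 1) + 1 from by omega, List.drop_succ_cons]
          simp only [Nat.add_sub_cancel]
        -- the pvF side
        obtain ⟨L1, L2, hL⟩ := List.append_of_mem hp0
        have hsplit : ∀ x : List Char,
            pvF L x = pvF L2 (pvRepl pr0.1 pr0.2 (pvF L1 x)) := by
          intro x
          rw [hL]
          simp [pvF, List.foldl_append]
        have hpair := (List.pairwise_append.mp (hL ▸ h7))
        have hL1ne : ∀ x ∈ L1, x.1 ≠ pr0.1 := by
          intro x hx
          exact hpair.2.2 x hx pr0 (by simp)
        have hL1mem : ∀ x ∈ L1, x ∈ L := by intro x hx; rw [hL]; simp [hx]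
        have hL2mem : ∀ x ∈ L2, x ∈ L := by intro x hx; rw [hL]; simp [hx]
        set t' := (c :: t).drop pr0.1.length with ht'
        -- initial freedom of the matched region for the earlier passes
        have hinv : ∀ qr ∈ L1, ∀ i < pr0.1.length, ¬ qr.1 <+: ((pr0.1 ++ t').drop i) := by
          intro qr hq i hi hcon
          rw [List.drop_append_of_le_length (le_of_lt hi)] at hcon
          rcases pvPrefixSplit hcon with hA | hB
          · exact pvSrcFree L h2 h6 hp0 (hL1mem qr hq) (hL1ne qr hq) hi hA
          · have hqdec : pr0.1.drop i ++ qr.1.drop (pr0.1.length - i) = qr.1 := by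
              have := List.prefix_iff_eq_append.mp hB
              rwa [List.length_drop] at this
            by_cases hwnil : qr.1.drop (pr0.1.length - i) = []
            · exact pvSrcFree L h2 h6 hp0 (hL1mem qr hq) (hL1ne qr hq) hi
                (by rw [← hqdec, hwnil, List.append_nil])
            · rcases Nat.eq_zero_or_pos i with rfl | hipos
              · rcases h2 qr (hL1mem qr hq) pr0 hp0 with heq | ⟨-, hnp2⟩
                · exact hL1ne qr hq heq
                · exact hnp2 (by simpa using hB)
              · -- a genuine overlapping occurrence inside s: contradicts pvNoCross
                apply hnc pr0 hp0 qr (hL1mem qr hq) 0 i (Ne.symm (hL1ne qr hq)) hipos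
                  (by omega)
                · rw [List.drop_zero, ← hdec]; exact ⟨t', rfl⟩
                · rw [← hdec, List.drop_append_of_le_length (le_of_lt hi)]
                  exact hcon
        have hstep : pvF L (c :: t) = pr0.2 ++ pvF L t' := by
          rw [show (c :: t) = pr0.1 ++ t' from hdec.symm]
          rw [hsplit (pr0.1 ++ t')]
          rw [pvPreStep L h1 h2 h3 h6 pr0 hp0 L1
              (fun x hx => ⟨hL1mem x hx, hL1ne x hx⟩) t' hinv]
          rw [pvRepl_prepend pr0.1 pr0.2 (pvF L1 t') hp0ne]
          rw [pvPostStep L h4 h5 pr0 hp0 L2 hL2mem (pvRepl pr0.1 pr0.2 (pvF L1 t'))]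
          rw [← hsplit t']
        rw [hstep]
        show pr0.2 ++ pvF L t' = pr0.2 ++ pvScan L (List.drop (pr0.1.length - 1) t)
        rw [hdrop]
        have hlen : t'.length ≤ n := by
          rw [ht']
          have : 0 < pr0.1.length := List.length_pos_iff.mpr hp0ne
          simp only [List.length_drop, List.length_cons]
          simp at hl
          omega
        rw [ih t' hlen (pvNoCross_drop L (c :: t) pr0.1.length hnc)]

set_option maxRecDepth 4096 in
theorem pvOK_pack1 : pvOK1 (pvPairs true) := by unfold pvOK1; decide
set_option maxRecDepth 4096 in
theorem pvOK_pack2 : pvOK2 (pvPairs true) := by unfold pvOK2; decide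
set_option maxRecDepth 4096 in
theorem pvOK_pack3 : pvOK3 (pvPairs true) = true := by decide
set_option maxRecDepth 4096 in
theorem pvOK_pack4 : pvOK4 (pvPairs true) := by unfold pvOK4; decide
set_option maxRecDepth 4096 in
theorem pvOK_pack5 : pvOK5 (pvPairs true) := by unfold pvOK5; decide
set_option maxRecDepth 4096 in
theorem pvOK_pack6 : pvOK6 (pvPairs true) := by unfold pvOK6; decide
set_option maxRecDepth 4096 in
theorem pvOK_pack7 : pvOK7 (pvPairs true) := by unfold pvOK7; decide
set_option maxRecDepth 4096 in
theorem pvOK_unpack1 : pvOK1 (pvPairs false) := by unfold pvOK1; decide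
set_option maxRecDepth 4096 in
theorem pvOK_unpack2 : pvOK2 (pvPairs false) := by unfold pvOK2; decide
set_option maxRecDepth 4096 in
theorem pvOK_unpack3 : pvOK3 (pvPairs false) = true := by decide
set_option maxRecDepth 4096 in
theorem pvOK_unpack4 : pvOK4 (pvPairs false) := by unfold pvOK4; decide
set_option maxRecDepth 4096 in
theorem pvOK_unpack5 : pvOK5 (pvPairs false) := by unfold pvOK5; decide
set_option maxRecDepth 4096 in
theorem pvOK_unpack6 : pvOK6 (pvPairs false) := by unfold pvOK6; decide
set_option maxRecDepth 4096 in
theorem pvOK_unpack7 : pvOK7 (pvPairs false) := by unfold pvOK7; decide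
set_option maxRecDepth 4096 in
theorem pvCross_pack1 : ∀ pr ∈ pvPairs true, ∀ qr ∈ pvPairs true, pr.1 ≠ qr.1 →
    ∀ m, m < pr.1.length → 0 < m → pr.1.drop m <+: qr.1 → pr.1 ∈ pvPlaceholders := by decide
set_option maxRecDepth 4096 in
theorem pvCross_pack2 : ∀ pr ∈ pvPairs true, ∀ qr ∈ pvPairs true, pr.1 ≠ qr.1 →
    ∀ m, m < pr.1.length → 0 < m → pr.1.drop m <+: qr.1 → qr.1 ∈ pvPlaceholders := by decide
set_option maxRecDepth 4096 in
theorem pvCross_unpack : ∀ pr ∈ pvPairs false, ∀ qr ∈ pvPairs false, pr.1 ≠ qr.1 →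
    ∀ m, m < pr.1.length → 0 < m → ¬ pr.1.drop m <+: qr.1 := by decide

theorem pvLtOfDropPrefix {q s : List Char} {j : Nat} (hq : q ≠ []) (h : q <+: s.drop j) :
    j < s.length := by
  by_contra hc
  push_neg at hc
  rw [List.drop_eq_nil_of_le hc] at h
  exact hq (List.prefix_nil.mp h)

-- a cross overlap of two distinct source tokens forces both to be placeholders (pack table)
theorem pvCrossCommon (mode : Bool) (h6 : pvOK6 (pvPairs mode)) (s : List Char) :
    ∀ pr ∈ pvPairs mode, ∀ qr ∈ pvPairs mode, ∀ i j : Nat, pr.1 ≠ qr.1 → i < j →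
      j < i + pr.1.length → pr.1 <+: s.drop i → qr.1 <+: s.drop j →
      pr.1.drop (j - i) <+: qr.1 := by
  intro pr hp qr hq i j hne hij hlt hpre hqre
  have hdec : pr.1 ++ (s.drop i).drop pr.1.length = s.drop i :=
    List.prefix_iff_eq_append.mp hpre
  have hdj : s.drop j = pr.1.drop (j - i) ++ (s.drop i).drop pr.1.length := by
    have : s.drop j = (s.drop i).drop (j - i) := by
      rw [List.drop_drop]
      congr 1
      omega
    rw [this, ← hdec, List.drop_append_of_le_length (by omega)]
    simp
  rw [hdj] at hqre
  rcases pvPrefixSplit hqre with hA | hB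
  · exact absurd hA (h6 pr hp (j - i) (by omega) (by omega) qr hq)
  · exact hB

theorem pvNoCross_pack (s : List Char) (hov : pvHasPHOverlap s = false) :
    pvNoCross (pvPairs true) s := by
  intro pr hp qr hq i j hne hij hlt hpre hqre
  have hcross := pvCrossCommon true pvOK_pack6 s pr hp qr hq i j hne hij hlt hpre hqre
  have hpPH : pr.1 ∈ pvPlaceholders :=
    pvCross_pack1 pr hp qr hq hne (j - i) (by omega) (by omega) hcross
  have hqPH : qr.1 ∈ pvPlaceholders :=
    pvCross_pack2 pr hp qr hq hne (j - i) (by omega) (by omega) hcross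
  have hilt : i < s.length :=
    pvLtOfDropPrefix (pvOK_pack1 pr hp).1 hpre
  have hjlt : j < s.length :=
    pvLtOfDropPrefix (pvOK_pack1 qr hq).1 hqre
  have : pvHasPHOverlap s = true := by
    simp only [pvHasPHOverlap, List.any_eq_true, List.mem_range, Bool.and_eq_true,
      bne_iff_ne, decide_eq_true_eq, List.isPrefixOf_iff_prefix]
    exact ⟨i, hilt, j, hjlt, pr.1, hpPH, qr.1, hqPH, ⟨⟨⟨⟨hne, by omega⟩, by omega⟩, hpre⟩, hqre⟩⟩
  rw [this] at hov
  simp at hov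

theorem pvNoCross_unpack (s : List Char) : pvNoCross (pvPairs false) s := by
  intro pr hp qr hq i j hne hij hlt hpre hqre
  have hcross := pvCrossCommon false pvOK_unpack6 s pr hp qr hq i j hne hij hlt hpre hqre
  exact pvCross_unpack pr hp qr hq hne (j - i) (by omega) (by omega) hcross

-- ===== VERDICT (by name: the statement is the Claim_ definition above) =====
theorem swap_tokens_spec : Claim_equal_swap_tokens := by
  intro string pack _hdom hpre
  unfold Spec_swap_tokens
  apply String.ext
  rw [pvA_toList, pvB_toList]
  cases pack with
  | false =>
    exact pvMain (pvPairs false) pvOK_unpack1 pvOK_unpack2 pvOK_unpack3 pvOK_unpack4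
      pvOK_unpack5 pvOK_unpack6 pvOK_unpack7 string.toList.length string.toList le_rfl
      (pvNoCross_unpack string.toList)
  | true =>
    exact pvMain (pvPairs true) pvOK_pack1 pvOK_pack2 pvOK_pack3 pvOK_pack4
      pvOK_pack5 pvOK_pack6 pvOK_pack7 string.toList.length string.toList le_rfl
      (pvNoCross_pack string.toList (hpre rfl))
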